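-- pv_equiv track=rewrite | github.com/TrellixVulnTeam/QCC3040_Earbud_3ZLT | QCC514x_304x_Earbud/rdp/charger_case_comms_stm32/dfu.py | make_s3
-- ===== SOURCE A (Python) =====
-- def make_s3(address, payload, payload_count):
--
--     # Pad out payload if it is not divisible by 4 bytes.
--     while (payload_count % 4):
--         payload += 'FF'
--         payload_count += 1
--
--     rec = '{:02X}{:08X}'.format(payload_count + 5, address) + payload
--
--     csum = 0
--     rlen = len(rec)
--
--     for n in range(0, rlen, 2):
--         csum += int(rec[n:n+2], 16)
--
--     csum = csum & 0xFF
--     csum = csum ^ 0xFF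
--
--     rec = 'S3' + rec + '{:02X}'.format(csum)
--
--     return rec
-- ===== SOURCE B (Python) =====
-- def make_s3(address, payload, payload_count):
--     # Closed-form padding instead of a while loop.
--     pad = (-payload_count) % 4
--     payload_count += pad
--     payload += 'FF' * pad
--
--     # Checksum from numeric components: count field + address bytes + payload bytes,
--     # instead of re-scanning the formatted record.
--     q0, b0 = divmod(address, 256)
--     q1, b1 = divmod(q0, 256)
--     q2, b2 = divmod(q1, 256)
--     b3 = q2 % 256
--     csum = (payload_count + 5) + b3 + b2 + b1 + b0
--     for n in range(0, len(payload), 2):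
--         csum += int(payload[n:n+2], 16)
--     csum = (csum & 0xFF) ^ 0xFF
--
--     return 'S3{:02X}{:08X}'.format(payload_count + 5, address) + payload + '{:02X}'.format(csum)
-- ===== Notes on version B (the rewrite author's own statement) =====
-- stated objective: alternative
-- what changed: B replaces A's while-loop padding by a closed-form pad count and computes the checksum arithmetically from the count field and the address bytes (divmod chain) plus one pass over the payload pairs, instead of re-scanning the whole formatted record string.
-- outside the precondition, e.g. on make_s3(-5, '', 0): A returns 'S305-0000005F5', B returns 'S305-000000502'; on make_s3(0, '', -30): A returns 'S3-1700000000FFFF73', B returns 'S3-1700000000FFFF18'; on make_s3(0, 'A', 249): A returns 'S310100000000AFFFFFFD8', B returns 'S310100000000AFFFFFF42'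
import Mathlib
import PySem

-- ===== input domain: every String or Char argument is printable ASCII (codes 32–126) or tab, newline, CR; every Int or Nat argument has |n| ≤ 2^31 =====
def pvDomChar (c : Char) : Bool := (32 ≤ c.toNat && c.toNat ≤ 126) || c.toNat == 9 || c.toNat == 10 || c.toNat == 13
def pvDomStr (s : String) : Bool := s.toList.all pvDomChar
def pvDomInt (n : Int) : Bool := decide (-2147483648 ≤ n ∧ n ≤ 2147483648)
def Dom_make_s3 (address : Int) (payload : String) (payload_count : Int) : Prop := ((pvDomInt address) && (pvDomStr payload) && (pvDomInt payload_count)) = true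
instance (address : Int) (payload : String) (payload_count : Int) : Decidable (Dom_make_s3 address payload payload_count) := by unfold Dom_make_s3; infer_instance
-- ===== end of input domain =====

-- B replaces A's while-loop padding by a closed-form pad count and computes the checksum
-- arithmetically from the count field and the address bytes plus one pass over the payload
-- pairs, instead of re-scanning the whole formatted record (objective: alternative).

-- shared helpers: ports of Python's '{:0wX}'.format and int(s, 16)
-- hexDigitChar n: the uppercase hex digit for n < 16
def hexDigitChar (n : Nat) : Char :=
  if n < 10 then Char.ofNat (48 + n) else Char.ofNat (55 + n)

-- port of '{:0wX}'.format(v), extracting the w hex digits; exact for 0 ≤ v < 16^w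
-- (guaranteed under Pre_)
def fmtHex (v : Int) : Nat → List Char
  | 0 => []
  | w + 1 => fmtHex (v / 16) w ++ [hexDigitChar (v % 16).toNat]

-- value of one hex digit; 0 on non-hex chars, where int(s,16) raises (excluded by Pre_)
def hexVal (c : Char) : Int :=
  if '0' ≤ c ∧ c ≤ '9' then (c.toNat : Int) - 48
  else if 'A' ≤ c ∧ c ≤ 'F' then (c.toNat : Int) - 55
  else if 'a' ≤ c ∧ c ≤ 'f' then (c.toNat : Int) - 87
  else 0

-- port of int(s, 16); exact for nonempty strings of hex digits (guaranteed under Pre_)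
def parsePair (l : List Char) : Int := l.foldl (fun a c => a * 16 + hexVal c) 0

-- ===== PORT A =====
-- the while loop: pad with 'FF' until payload_count % 4 == 0.  The loop body runs at
-- most 3 times (payload_count % 4 reaches 0 after at most 3 increments), so a fuel of 4
-- only makes the recursion structural; it never cuts the loop short.
def padAGo (s : List Char) (c : Int) : Nat → List Char × Int
  | 0 => (s, c)
  | k + 1 => if PySem.Int.mod c 4 ≠ 0 then padAGo (s ++ ['F', 'F']) (c + 1) k else (s, c)

def padA (s : List Char) (c : Int) : List Char × Int := padAGo s c 4

def make_s3 (address : Int) (payload : String) (payload_count : Int) : String :=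
  let pp := padA payload.toList payload_count
  let rl := fmtHex (pp.2 + 5) 2 ++ fmtHex address 8 ++ pp.1
  let csum := (PySem.List.pyRange 0 (rl.length : Int) 2).foldl
      (fun c n => c + parsePair (PySem.List.slice rl (some n) (some (n + 2)))) 0
  let csum2 := PySem.Int.bxor (PySem.Int.band csum 255) 255
  String.ofList ('S' :: '3' :: (rl ++ fmtHex csum2 2))

-- ===== PORT B =====
def make_s3_alt (address : Int) (payload : String) (payload_count : Int) : String :=
  let pad := PySem.Int.mod (-payload_count) 4
  let count := payload_count + pad
  let pl := payload.toList ++ List.flatten (List.replicate pad.toNat ['F', 'F'])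
  let q0 := PySem.Int.floordiv address 256
  let b0 := PySem.Int.mod address 256
  let q1 := PySem.Int.floordiv q0 256
  let b1 := PySem.Int.mod q0 256
  let q2 := PySem.Int.floordiv q1 256
  let b2 := PySem.Int.mod q1 256
  let b3 := PySem.Int.mod q2 256
  let csum := (PySem.List.pyRange 0 (pl.length : Int) 2).foldl
      (fun c n => c + parsePair (PySem.List.slice pl (some n) (some (n + 2))))
      ((count + 5) + b3 + b2 + b1 + b0)
  let csum2 := PySem.Int.bxor (PySem.Int.band csum 255) 255
  String.ofList ('S' :: '3' :: ((fmtHex (count + 5) 2 ++ fmtHex address 8 ++ pl) ++ fmtHex csum2 2))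

-- ===== PRECONDITION & SPEC =====
-- Pre_ excludes inputs where A raises ValueError (payloads with a non-hex-digit character —
-- a few of those, with a sign or space starting a pair, are accidentally accepted by int()'s
-- lenient parsing and kept out too) and the defensible corners where the formatted record is
-- malformed garbage either way: negative addresses (sign character inside the hex field) and
-- counts whose padded count field leaves two hex digits (below -7 or above 248), on which
-- A's pair alignment over the record is accidental.
def Pre_make_s3 (address : Int) (payload : String) (payload_count : Int) : Prop :=
  0 ≤ address ∧ address < 4294967296 ∧ -7 ≤ payload_count ∧ payload_count ≤ 248 ∧
  payload.toList.all
    (fun c => decide (('0' ≤ c ∧ c ≤ '9') ∨ ('A' ≤ c ∧ c ≤ 'F') ∨ ('a' ≤ c ∧ c ≤ 'f'))) = true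
instance (address : Int) (payload : String) (payload_count : Int) : Decidable (Pre_make_s3 address payload payload_count) := by unfold Pre_make_s3; infer_instance

def pvWitness_make_s3 : Int × String × Int := (4660, "AB12", 2)

def Spec_make_s3 (address : Int) (payload : String) (payload_count : Int) (out : String) : Prop := out = make_s3_alt address payload payload_count
instance (address : Int) (payload : String) (payload_count : Int) (out : String) : Decidable (Spec_make_s3 address payload payload_count out) := by unfold Spec_make_s3; infer_instance

-- ===== CLAIM (what is proved, stated in full; the proofs are below) =====
def Claim_equal_make_s3 : Prop := ∀ (address : Int) (payload : String) (payload_count : Int), Dom_make_s3 address payload payload_count → Pre_make_s3 address payload payload_count → Spec_make_s3 address payload payload_count (make_s3 address payload payload_count)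

-- ===== LEMMAS AND PROOFS =====

-- sum of the two-hex-digit groups of a char list (last group may be a single char)
def pairSum : List Char → Int
  | [] => 0
  | [a] => hexVal a
  | a :: b :: t => (hexVal a * 16 + hexVal b) + pairSum t

theorem hexVal_hexDigitChar (n : Nat) (h : n < 16) : hexVal (hexDigitChar n) = n := by
  interval_cases n <;> decide

theorem length_fmtHex (v : Int) (w : Nat) : (fmtHex v w).length = w := by
  induction w generalizing v with
  | zero => simp [fmtHex]
  | succ w ih => simp [fmtHex, ih]

theorem pairSum_append (l1 l2 : List Char) (h : l1.length % 2 = 0) :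
    pairSum (l1 ++ l2) = pairSum l1 + pairSum l2 := by
  induction l1 using pairSum.induct with
  | case1 => simp [pairSum]
  | case2 a => simp at h
  | case3 a b t ih =>
      simp only [List.cons_append, pairSum]
      rw [ih (by simp at h; omega)]
      ring

theorem scan_aux (m : Nat) : ∀ (full : List Char) (i : Nat) (acc : Int),
    full.length ≤ i + m →
    ((List.range (((full.length : Int) - i + 1) / 2).toNat).map
        (fun k : Nat => (i : Int) + 2 * k)).foldl
      (fun c n => c + parsePair (PySem.List.slice full (some n) (some (n + 2)))) acc
    = acc + pairSum (List.drop i full) := by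
  induction m with
  | zero =>
      intro full i acc hle
      have h1 : (((full.length : Int) - i + 1) / 2).toNat = 0 := by omega
      have h2 : List.drop i full = [] := List.drop_eq_nil_of_le (by omega)
      simp [h1, h2, pairSum]
  | succ m ih =>
      intro full i acc hle
      by_cases hlt : i < full.length
      · have hc : (((full.length : Int) - i + 1) / 2).toNat
            = (((full.length : Int) - (i + 2) + 1) / 2).toNat + 1 := by omega
        rw [hc, List.range_succ_eq_map, List.map_cons, List.map_map, List.foldl_cons]
        have hf : ((fun k : Nat => (i : Int) + 2 * k) ∘ Nat.succ)
            = (fun k : Nat => ((i + 2 : Nat) : Int) + 2 * k) := by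
          funext k
          simp only [Function.comp]
          push_cast
          ring
        rw [hf]
        have := ih full (i + 2) (acc + parsePair (PySem.List.slice full (some ((i : Int) + 2 * (0 : Nat))) (some ((i : Int) + 2 * (0 : Nat) + 2)))) (by omega)
        push_cast at this ⊢
        rw [this]
        have hslice : PySem.List.slice full (some ((i : Int) + 0)) (some ((i : Int) + 0 + 2))
            = (full.drop i).take 2 := by
          rw [show ((i : Int) + 0) = ((i : Int)) by ring,
            show ((i : Int) + 2) = ((i : Int) + ((2 : Nat) : Int)) by norm_num]
          exact PySem.List.slice_natCast_add full i 2
        rw [hslice]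
        have hdd : List.drop (i + 2) full = List.drop 2 (List.drop i full) := by
          rw [List.drop_drop]
        rcases hd : List.drop i full with _ | ⟨a, rest⟩
        · exfalso
          have hld : (List.drop i full).length = full.length - i := List.length_drop
          rw [hd] at hld
          simp at hld
          omega
        · rcases rest with _ | ⟨b, t⟩
          · simp [hdd, hd, pairSum, parsePair]
          · simp only [hdd, hd]
            simp [pairSum, parsePair]
            ring
      · have h1 : (((full.length : Int) - i + 1) / 2).toNat = 0 := by omega
        have h2 : List.drop i full = [] := List.drop_eq_nil_of_le (by omega)
        simp [h1, h2, pairSum]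

theorem scan_zero (full : List Char) (acc : Int) :
    (PySem.List.pyRange 0 (full.length : Int) 2).foldl
      (fun c n => c + parsePair (PySem.List.slice full (some n) (some (n + 2)))) acc
    = acc + pairSum full := by
  rw [PySem.List.pyRange_of_pos 0 (full.length : Int) (by norm_num)]
  have hc : (if (0 : Int) < (full.length : Int) then
        (((full.length : Int) - 0 + 2 - 1) / 2).toNat else 0)
      = (((full.length : Int) - (0 : Nat) + 1) / 2).toNat := by
    split_ifs <;> omega
  have hf : (fun k : Nat => (0 : Int) + 2 * k) = (fun k : Nat => ((0 : Nat) : Int) + 2 * k) := by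
    funext k; push_cast; ring
  rw [hc, hf, scan_aux full.length full 0 acc (by omega)]
  simp

theorem padAGo_succ (s : List Char) (c : Int) (k : Nat) :
    padAGo s c (k + 1)
      = if PySem.Int.mod c 4 ≠ 0 then padAGo (s ++ ['F', 'F']) (c + 1) k else (s, c) := rfl

theorem padA_eq (s : List Char) (c : Int) :
    padA s c = (s ++ List.flatten (List.replicate (PySem.Int.mod (-c) 4).toNat ['F', 'F']),
                c + PySem.Int.mod (-c) 4) := by
  have e : ∀ x : Int, PySem.Int.mod x 4 = x % 4 :=
    fun x => PySem.Int.mod_eq_emod_of_pos (by norm_num)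
  have hr : c % 4 = 0 ∨ c % 4 = 1 ∨ c % 4 = 2 ∨ c % 4 = 3 := by omega
  unfold padA
  rcases hr with h | h | h | h
  · have hp : ((-c) % 4).toNat = 0 := by omega
    rw [show (4 : Nat) = 3 + 1 from rfl, padAGo_succ, if_neg (by rw [e]; omega)]
    simp [hp]
    omega
  · have hp : ((-c) % 4).toNat = 3 := by omega
    rw [show (4 : Nat) = 3 + 1 from rfl, padAGo_succ, if_pos (by rw [e]; omega)]
    rw [padAGo_succ, if_pos (by rw [e]; omega)]
    rw [padAGo_succ, if_pos (by rw [e]; omega)]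
    rw [padAGo_succ, if_neg (by rw [e]; omega)]
    simp [hp]
    omega
  · have hp : ((-c) % 4).toNat = 2 := by omega
    rw [show (4 : Nat) = 3 + 1 from rfl, padAGo_succ, if_pos (by rw [e]; omega)]
    rw [padAGo_succ, if_pos (by rw [e]; omega)]
    rw [padAGo_succ, if_neg (by rw [e]; omega)]
    simp [hp]
    omega
  · have hp : ((-c) % 4).toNat = 1 := by omega
    rw [show (4 : Nat) = 3 + 1 from rfl, padAGo_succ, if_pos (by rw [e]; omega)]
    rw [padAGo_succ, if_neg (by rw [e]; omega)]
    simp [hp]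
    omega

theorem hexVal_digit_mod (m : Int) : hexVal (hexDigitChar ((m % 16).toNat)) = m % 16 := by
  have h : (m % 16).toNat < 16 := by omega
  rw [hexVal_hexDigitChar _ h]
  omega

theorem fmtHex_succ (v : Int) (w : Nat) :
    fmtHex v (w + 1) = fmtHex (v / 16) w ++ [hexDigitChar (v % 16).toNat] := rfl

theorem pairSum_fmtHex2 (v : Int) (h0 : 0 ≤ v) (h : v < 256) : pairSum (fmtHex v 2) = v := by
  have hexp : fmtHex v 2 = [hexDigitChar ((v / 16 % 16).toNat), hexDigitChar ((v % 16).toNat)] := rfl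
  rw [hexp]
  simp only [pairSum, hexVal_digit_mod]
  omega

theorem pairSum_fmtHex8 (v : Int) (h0 : 0 ≤ v) (h : v < 4294967296) :
    pairSum (fmtHex v 8)
      = (v / 16777216) % 256 + (v / 65536) % 256 + (v / 256) % 256 + v % 256 := by
  have hexp : fmtHex v 8 =
      [hexDigitChar ((v / 16 / 16 / 16 / 16 / 16 / 16 / 16 % 16).toNat),
       hexDigitChar ((v / 16 / 16 / 16 / 16 / 16 / 16 % 16).toNat),
       hexDigitChar ((v / 16 / 16 / 16 / 16 / 16 % 16).toNat),
       hexDigitChar ((v / 16 / 16 / 16 / 16 % 16).toNat),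
       hexDigitChar ((v / 16 / 16 / 16 % 16).toNat),
       hexDigitChar ((v / 16 / 16 % 16).toNat),
       hexDigitChar ((v / 16 % 16).toNat),
       hexDigitChar ((v % 16).toNat)] := by
    show fmtHex v (7 + 1) = _
    rw [fmtHex_succ]
    show fmtHex _ (6 + 1) ++ _ = _
    rw [fmtHex_succ]
    show (fmtHex _ (5 + 1) ++ _) ++ _ = _
    rw [fmtHex_succ]
    show ((fmtHex _ (4 + 1) ++ _) ++ _) ++ _ = _
    rw [fmtHex_succ]
    show (((fmtHex _ (3 + 1) ++ _) ++ _) ++ _) ++ _ = _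
    rw [fmtHex_succ]
    show ((((fmtHex _ (2 + 1) ++ _) ++ _) ++ _) ++ _) ++ _ = _
    rw [fmtHex_succ]
    show (((((fmtHex _ (1 + 1) ++ _) ++ _) ++ _) ++ _) ++ _) ++ _ = _
    rw [fmtHex_succ]
    show ((((((fmtHex _ (0 + 1) ++ _) ++ _) ++ _) ++ _) ++ _) ++ _) ++ _ = _
    rw [fmtHex_succ]
    simp [fmtHex]
  rw [hexp]
  simp only [pairSum, hexVal_digit_mod]
  omega

-- ===== VERDICT (by name: the statement is the Claim_ definition above) =====
theorem make_s3_spec : Claim_equal_make_s3 := by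
  intro address payload payload_count hdom hpre
  obtain ⟨ha0, ha1, hc0, hc1, _⟩ := hpre
  unfold Spec_make_s3 make_s3 make_s3_alt
  rw [padA_eq]
  have e : ∀ x : Int, PySem.Int.mod x 4 = x % 4 :=
    fun x => PySem.Int.mod_eq_emod_of_pos (by norm_num)
  have e256 : ∀ x : Int, PySem.Int.mod x 256 = x % 256 :=
    fun x => PySem.Int.mod_eq_emod_of_pos (by norm_num)
  have f256 : ∀ x : Int, PySem.Int.floordiv x 256 = x / 256 :=
    fun x => PySem.Int.floordiv_eq_ediv_of_pos (by norm_num)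
  simp only [e, e256, f256]
  set pad := (-payload_count) % 4 with hpad
  set count := payload_count + pad with hcount
  set pl := payload.toList ++ List.flatten (List.replicate pad.toNat ['F', 'F']) with hpl
  have hpadb : 0 ≤ pad ∧ pad < 4 := by constructor <;> omega
  have hcb : 0 ≤ count + 5 ∧ count + 5 < 256 := by
    constructor <;> omega
  rw [scan_zero, scan_zero]
  have hsplit : pairSum (fmtHex (count + 5) 2 ++ fmtHex address 8 ++ pl)
      = pairSum (fmtHex (count + 5) 2) + pairSum (fmtHex address 8) + pairSum pl := by
    rw [List.append_assoc, pairSum_append _ _ (by rw [length_fmtHex]),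
      pairSum_append _ _ (by rw [length_fmtHex])]
    ring
  rw [hsplit, pairSum_fmtHex2 _ hcb.1 hcb.2, pairSum_fmtHex8 _ ha0 ha1]
  generalize pairSum pl = P
  have harg : (0 + (count + 5 + (address / 16777216 % 256 + address / 65536 % 256
        + address / 256 % 256 + address % 256) + P))
      = (count + 5 + address / 256 / 256 / 256 % 256 + address / 256 / 256 % 256
        + address / 256 % 256 + address % 256 + P) := by
    omega
  rw [harg]
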